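-- pv_equiv track=rewrite | github.com/nguyenchiemminhvu/DSA | Problems/Leetcode/EarliestFinishTimeForLandAndWaterRidesI/solve.py | earliestFinishTime
-- ===== SOURCE A (Python) =====
-- from typing import List
--
-- def earliestFinishTime(astart: List[int], aduration: List[int], bstart: List[int], bduration: List[int]) -> int:
--     res = float('inf')
--
--     for ia in range(len(astart)):
--         a_s, a_d = astart[ia], aduration[ia]
--         for ib in range(len(bstart)):
--             b_s, b_d = bstart[ib], bduration[ib]
--
--             intervals = [[a_s, a_d], [b_s, b_d]]
--             intervals.sort(key=lambda x: x[0])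
--
--             first_s, first_d = intervals[0]
--             second_s, second_d = intervals[1]
--
--             first_end = first_s + first_d
--
--             if first_end <= second_s:
--                 finish_time = second_s + second_d
--             else:
--                 finish_time = first_end + second_d
--
--             res = min(res, finish_time)
--
--     return res
-- ===== SOURCE B (Python) =====
-- from typing import List
--
-- def earliestFinishTime(astart: List[int], aduration: List[int], bstart: List[int], bduration: List[int]) -> int:
--     # Sort both ride lists by start time, then sweep each against the other with a
--     # moving pointer and a running minimum of end times: O((n+m) log(n+m)).
--     ra = sorted(((s, s + d) for s, d in zip(astart, aduration)), key=lambda p: p[0])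
--     rb = sorted(((s, s + d) for s, d in zip(bstart, bduration)), key=lambda p: p[0])
--
--     best = None
--
--     def sweep(first, second, strict):
--         # pair every q in `second` with every p in `first` whose start precedes q's
--         # (p.start <= q.start, or strictly < when `strict`); p rides first.
--         nonlocal best
--         i = 0
--         mine = None  # min end time among eligible p's
--         for qs, qe in second:
--             while i < len(first) and (first[i][0] < qs if strict else first[i][0] <= qs):
--                 e = first[i][1]
--                 if mine is None or e < mine:
--                     mine = e
--                 i += 1
--             if mine is not None:
--                 cand = max(mine, qs) + (qe - qs)
--                 if best is None or cand < best:
--                     best = cand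
--
--     sweep(ra, rb, False)  # a first when a_s <= b_s
--     sweep(rb, ra, True)   # b first when b_s < a_s
--     return best
-- ===== Notes on version B (the rewrite author's own statement) =====
-- stated objective: faster
-- what changed: Replaced A's brute force over all (land, water) pairs with a 2-element sort per pair by sorting both ride lists by start time once and running two merge-style pointer sweeps that keep a running minimum of eligible end times.
-- outside the precondition, e.g. on earliestFinishTime([], [], [1], [1]): A returns inf, B returns None; on earliestFinishTime([1, 2], [1], [1], [1]): A raises IndexError, B returns 3
import Mathlib
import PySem

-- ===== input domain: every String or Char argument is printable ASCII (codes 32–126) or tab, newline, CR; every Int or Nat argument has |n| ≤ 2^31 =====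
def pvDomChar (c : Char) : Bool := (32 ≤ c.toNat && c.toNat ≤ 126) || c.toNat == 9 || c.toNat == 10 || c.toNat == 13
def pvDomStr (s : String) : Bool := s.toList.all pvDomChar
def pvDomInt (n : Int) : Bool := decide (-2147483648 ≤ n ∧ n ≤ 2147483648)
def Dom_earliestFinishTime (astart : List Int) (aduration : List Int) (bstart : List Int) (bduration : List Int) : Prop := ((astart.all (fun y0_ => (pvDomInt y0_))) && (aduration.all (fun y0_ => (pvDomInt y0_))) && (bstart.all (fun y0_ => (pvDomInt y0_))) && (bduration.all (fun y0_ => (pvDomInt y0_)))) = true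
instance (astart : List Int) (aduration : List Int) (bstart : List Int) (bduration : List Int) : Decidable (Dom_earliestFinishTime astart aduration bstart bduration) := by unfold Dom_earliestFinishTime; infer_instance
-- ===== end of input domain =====

-- B replaces A's brute force over all pairs by sorting both ride lists and sweeping each
-- against the other with a moving pointer and a running minimum of end times (objective: faster).

-- ===== PORT A =====
-- `res = min(res, x)` where res starts at float('inf'): none plays the infinity.
def aMin (res : Option Int) (x : Int) : Option Int :=
  match res with
  | none => some x
  | some m => some (min m x)

def earliestFinishTime (astart : List Int) (aduration : List Int) (bstart : List Int) (bduration : List Int) : Int :=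
  let res : Option Int :=
    (PySem.List.pyRange 0 (PySem.List.len astart) 1).foldl (fun res ia =>
      let a_s := PySem.List.pyGetD astart ia 0        -- astart[ia]; in range under Pre_
      let a_d := PySem.List.pyGetD aduration ia 0     -- aduration[ia]; in range under Pre_
      (PySem.List.pyRange 0 (PySem.List.len bstart) 1).foldl (fun res ib =>
        let b_s := PySem.List.pyGetD bstart ib 0
        let b_d := PySem.List.pyGetD bduration ib 0
        let intervals := PySem.List.sorted [(a_s, a_d), (b_s, b_d)] (fun x => x.1) false
        let first := PySem.List.pyGetD intervals 0 (0, 0)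
        let second := PySem.List.pyGetD intervals 1 (0, 0)
        let first_end := first.1 + first.2
        let finish_time := if first_end ≤ second.1 then second.1 + second.2 else first_end + second.2
        aMin res finish_time) res) none
  res.getD 0   -- A returns float('inf') when a list is empty: excluded by Pre_

-- ===== PORT B =====
-- `if best is None or cand < best: best = cand`
def bUpd (best : Option Int) (cand : Int) : Option Int :=
  match best with
  | none => some cand
  | some m => if cand < m then some cand else some m

-- the `while` pointer loop: consume the prefix of `first` whose start precedes qs,
-- folding their end times into `mine`.
def bAdvance (strict : Bool) (qs : Int) : List (Int × Int) → Option Int → List (Int × Int) × Option Int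
  | [], mine => ([], mine)
  | (s, e) :: rest, mine =>
    if (if strict then s < qs else s ≤ qs) then bAdvance strict qs rest (bUpd mine e)
    else ((s, e) :: rest, mine)

-- the `for (qs, qe) in second` loop of sweep()
def bSweep (strict : Bool) (first second : List (Int × Int)) (mine best : Option Int) : Option Int :=
  match second with
  | [] => best
  | (qs, qe) :: qrest =>
    let st := bAdvance strict qs first mine
    bSweep strict st.1 qrest st.2
      (match st.2 with
       | none => best
       | some me => bUpd best (max me qs + (qe - qs)))

def toRides (ss ds : List Int) : List (Int × Int) :=
  (ss.zip ds).map (fun p => (p.1, p.1 + p.2))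

def earliestFinishTime_alt (astart : List Int) (aduration : List Int) (bstart : List Int) (bduration : List Int) : Int :=
  let ra := PySem.List.sorted (toRides astart aduration) (fun p => p.1) false
  let rb := PySem.List.sorted (toRides bstart bduration) (fun p => p.1) false
  let best1 := bSweep false ra rb none none     -- a first when a_s <= b_s
  let best := bSweep true rb ra none best1      -- b first when b_s < a_s
  best.getD 0   -- best is some _ under Pre_

-- ===== PRECONDITION & SPEC =====
-- Pre_ excludes empty ride lists (A returns float('inf'), not an int) and start lists longer
-- than their duration lists (A raises IndexError).
def Pre_earliestFinishTime (astart : List Int) (aduration : List Int) (bstart : List Int) (bduration : List Int) : Prop :=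
  astart ≠ [] ∧ bstart ≠ [] ∧ astart.length ≤ aduration.length ∧ bstart.length ≤ bduration.length

instance (astart : List Int) (aduration : List Int) (bstart : List Int) (bduration : List Int) : Decidable (Pre_earliestFinishTime astart aduration bstart bduration) := by unfold Pre_earliestFinishTime; infer_instance

def pvWitness_earliestFinishTime : List Int × List Int × List Int × List Int := ([0], [1], [2], [3])

def Spec_earliestFinishTime (astart : List Int) (aduration : List Int) (bstart : List Int) (bduration : List Int) (out : Int) : Prop := out = earliestFinishTime_alt astart aduration bstart bduration
instance (astart : List Int) (aduration : List Int) (bstart : List Int) (bduration : List Int) (out : Int) : Decidable (Spec_earliestFinishTime astart aduration bstart bduration out) := by unfold Spec_earliestFinishTime; infer_instance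

-- ===== CLAIM (what is proved, stated in full; the proofs are below) =====
def Claim_equal_earliestFinishTime : Prop := ∀ (astart : List Int) (aduration : List Int) (bstart : List Int) (bduration : List Int), Dom_earliestFinishTime astart aduration bstart bduration → Pre_earliestFinishTime astart aduration bstart bduration → Spec_earliestFinishTime astart aduration bstart bduration (earliestFinishTime astart aduration bstart bduration)

-- ===== LEMMAS AND PROOFS =====

-- the per-pair finish time, on rides represented as (start, end)
def vPair (p q : Int × Int) : Int :=
  if p.1 ≤ q.1 then max p.2 q.1 + (q.2 - q.1) else max q.2 p.1 + (p.2 - p.1)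

-- A's inner-loop body as a function of the four numbers it reads
def finishOf (a_s a_d b_s b_d : Int) : Int :=
  let intervals := PySem.List.sorted [(a_s, a_d), (b_s, b_d)] (fun x => x.1) false
  let first := PySem.List.pyGetD intervals 0 (0, 0)
  let second := PySem.List.pyGetD intervals 1 (0, 0)
  let first_end := first.1 + first.2
  if first_end ≤ second.1 then second.1 + second.2 else first_end + second.2

-- A's inner loop as a function of the outer loop's reads
def innerG (bstart bduration : List Int) (r : Option Int) (s d : Int) : Option Int :=
  (PySem.List.pyRange 0 (PySem.List.len bstart) 1).foldl (fun res ib =>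
    aMin res (finishOf s d (PySem.List.pyGetD bstart ib 0) (PySem.List.pyGetD bduration ib 0))) r

def eligPred (strict : Bool) (qs : Int) (p : Int × Int) : Bool :=
  if strict then decide (p.1 < qs) else decide (p.1 ≤ qs)

def minSnd (l : List (Int × Int)) : Option Int := l.foldl (fun r p => aMin r p.2) none

def candList (strict : Bool) (P second : List (Int × Int)) : List Int :=
  second.filterMap (fun q =>
    (minSnd (P.filter (eligPred strict q.1))).map (fun me => max me q.1 + (q.2 - q.1)))

lemma bUpd_eq_aMin : bUpd = aMin := by
  funext o x
  cases o with
  | none => rfl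
  | some m =>
      show (if x < m then some x else some m) = some (min m x)
      rw [min_def]; split_ifs <;> first | rfl | omega

lemma sorted_two (p q : Int × Int) :
    PySem.List.sorted [p, q] (fun x => x.1) false = if p.1 ≤ q.1 then [p, q] else [q, p] := by
  simp [PySem.List.sorted_eq_foldl_insertBy, PySem.List.insertBy]
  split_ifs <;> simp_all
  omega

lemma finishOf_eq (a_s a_d b_s b_d : Int) :
    finishOf a_s a_d b_s b_d = vPair (a_s, a_s + a_d) (b_s, b_s + b_d) := by
  unfold finishOf vPair
  rw [sorted_two]
  by_cases h : a_s ≤ b_s <;> simp [h, PySem.List.pyGetD] <;> omega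

lemma fold_range_zip_aux {α : Type} (g : α → Int → Int → α) :
    ∀ (ss ds : List Int), ss.length ≤ ds.length → ∀ (init : α),
      (List.range ss.length).foldl (fun r i => g r (ss.getD i 0) (ds.getD i 0)) init
        = (ss.zip ds).foldl (fun r p => g r p.1 p.2) init := by
  intro ss
  induction ss with
  | nil => intro ds h init; rfl
  | cons x t ih =>
    intro ds h init
    cases ds with
    | nil => simp at h
    | cons y e =>
      simp only [List.length_cons, List.range_succ_eq_map, List.foldl_cons, List.foldl_map,
        List.getD_cons_zero, List.getD_cons_succ, List.zip_cons_cons]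
      exact ih e (by simpa using h) (g init x y)

lemma fold_range_zip {α : Type} (ss ds : List Int) (h : ss.length ≤ ds.length)
    (g : α → Int → Int → α) (init : α) :
    (PySem.List.pyRange 0 (PySem.List.len ss) 1).foldl
        (fun r i => g r (PySem.List.pyGetD ss i 0) (PySem.List.pyGetD ds i 0)) init
      = (ss.zip ds).foldl (fun r p => g r p.1 p.2) init := by
  rw [PySem.List.len_eq, PySem.List.pyRange_zero_natCast, List.foldl_map]
  simp only [PySem.List.pyGetD_natCast]
  exact fold_range_zip_aux g ss ds h init

lemma minFold_some (c : Int) (l : List Int) : l.foldl aMin (some c) = some (l.foldl min c) := by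
  induction l generalizing c with
  | nil => rfl
  | cons x t ih => simpa [aMin] using ih (min c x)

lemma minFold_eq_none (l : List Int) : l.foldl aMin none = none ↔ l = [] := by
  cases l with
  | nil => simp
  | cons x t => simp [aMin, minFold_some]

lemma foldl_min_spec (t : List Int) (c : Int) :
    (t.foldl min c = c ∨ t.foldl min c ∈ t) ∧ t.foldl min c ≤ c ∧ ∀ x ∈ t, t.foldl min c ≤ x := by
  induction t generalizing c with
  | nil => simp
  | cons z s ih =>
    obtain ⟨hmem, hle, hall⟩ := ih (min c z)
    refine ⟨?_, ?_, ?_⟩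
    · simp only [List.foldl_cons]
      rcases hmem with h | h
      · rw [h]; rcases le_total c z with h' | h'
        · left; simp [min_eq_left h']
        · right; simp [min_eq_right h']
      · right; simp [h]
    · simp only [List.foldl_cons]; exact hle.trans (min_le_left _ _)
    · intro x hx
      simp only [List.foldl_cons]
      rcases List.mem_cons.mp hx with h | h
      · subst h; exact hle.trans (min_le_right _ _)
      · exact hall x h

lemma minFold_spec (l : List Int) (m : Int) (h : l.foldl aMin none = some m) :
    m ∈ l ∧ ∀ x ∈ l, m ≤ x := by
  cases l with
  | nil => simp at h
  | cons x t =>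
    rw [List.foldl_cons] at h
    have h' : t.foldl aMin (some x) = some m := h
    rw [minFold_some] at h'
    obtain ⟨hmem, hle, hall⟩ := foldl_min_spec t x
    injection h' with h'
    subst h'
    refine ⟨?_, ?_⟩
    · rcases hmem with h | h
      · rw [h]; exact List.mem_cons_self
      · exact List.mem_cons_of_mem _ h
    · intro y hy
      rcases List.mem_cons.mp hy with h | h
      · subst h; exact hle
      · exact hall y h

lemma minFold_isSome (l : List Int) (x : Int) (hx : x ∈ l) : ∃ m, l.foldl aMin none = some m := by
  cases hl : l.foldl aMin none with
  | none => rw [minFold_eq_none] at hl; subst hl; simp at hx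
  | some m => exact ⟨m, rfl⟩

lemma minFold_eq (xs ys : List Int)
    (h1 : ∀ x ∈ xs, ∃ y ∈ ys, y ≤ x) (h2 : ∀ y ∈ ys, ∃ x ∈ xs, x ≤ y) :
    xs.foldl aMin none = ys.foldl aMin none := by
  cases xs with
  | nil =>
    cases ys with
    | nil => rfl
    | cons y t =>
      obtain ⟨x, hx, -⟩ := h2 y List.mem_cons_self
      simp at hx
  | cons x xt =>
    cases ys with
    | nil =>
      obtain ⟨y, hy, -⟩ := h1 x List.mem_cons_self
      simp at hy
    | cons y yt =>
      obtain ⟨m1, hm1⟩ := minFold_isSome (x :: xt) x List.mem_cons_self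
      obtain ⟨m2, hm2⟩ := minFold_isSome (y :: yt) y List.mem_cons_self
      rw [hm1, hm2]
      obtain ⟨hmem1, hle1⟩ := minFold_spec _ _ hm1
      obtain ⟨hmem2, hle2⟩ := minFold_spec _ _ hm2
      obtain ⟨y', hy', hy'le⟩ := h1 m1 hmem1
      obtain ⟨x', hx', hx'le⟩ := h2 m2 hmem2
      have := hle1 x' hx'
      have := hle2 y' hy'
      congr 1
      omega

-- ---- A-side reduction ----

lemma A_reduces (astart aduration bstart bduration : List Int)
    (h1 : astart.length ≤ aduration.length) (h2 : bstart.length ≤ bduration.length) :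
    earliestFinishTime astart aduration bstart bduration
      = (((toRides astart aduration).flatMap
            (fun p => (toRides bstart bduration).map (vPair p))).foldl aMin none).getD 0 := by
  have e1 : (PySem.List.pyRange 0 (PySem.List.len astart) 1).foldl
        (fun r i => innerG bstart bduration r (PySem.List.pyGetD astart i 0) (PySem.List.pyGetD aduration i 0)) none
      = (astart.zip aduration).foldl (fun r p => innerG bstart bduration r p.1 p.2) none :=
    fold_range_zip astart aduration h1 (innerG bstart bduration) none
  have e0 : earliestFinishTime astart aduration bstart bduration
      = ((astart.zip aduration).foldl (fun r p => innerG bstart bduration r p.1 p.2) none).getD 0 := by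
    rw [← e1]; rfl
  rw [e0]
  have e2 : (fun (r : Option Int) (p : Int × Int) => innerG bstart bduration r p.1 p.2)
      = (fun r p => ((toRides bstart bduration).map (vPair (p.1, p.1 + p.2))).foldl aMin r) := by
    funext r p
    have e3 : innerG bstart bduration r p.1 p.2
        = (bstart.zip bduration).foldl (fun r q => aMin r (finishOf p.1 p.2 q.1 q.2)) r :=
      fold_range_zip bstart bduration h2 (fun r bs bd => aMin r (finishOf p.1 p.2 bs bd)) r
    rw [e3, ← List.foldl_map]
    congr 1
    simp only [toRides, List.map_map]
    apply List.map_congr_left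
    intro q _
    simp [Function.comp, finishOf_eq]
  rw [e2]
  congr 1
  rw [show toRides astart aduration = (astart.zip aduration).map (fun p => (p.1, p.1 + p.2)) from rfl,
      List.flatMap_map, List.foldl_flatMap]

-- ---- B-side reduction ----

lemma advance_spec (strict : Bool) (qs : Int) :
    ∀ (first : List (Int × Int)) (mine : Option Int),
      bAdvance strict qs first mine
        = (first.dropWhile (eligPred strict qs),
           ((first.takeWhile (eligPred strict qs)).map Prod.snd).foldl aMin mine) := by
  intro first
  induction first with
  | nil => intro mine; rfl
  | cons p rest ih =>
    intro mine
    obtain ⟨s, e⟩ := p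
    by_cases h : eligPred strict qs (s, e) = true
    · have hc : (if strict then s < qs else s ≤ qs) := by
        cases strict <;> simpa [eligPred] using h
      rw [bAdvance, if_pos hc, ih (bUpd mine e), List.dropWhile_cons_of_pos h,
        List.takeWhile_cons_of_pos h]
      simp [bUpd_eq_aMin]
    · have hc : ¬ (if strict then s < qs else s ≤ qs) := by
        cases strict <;> simpa [eligPred] using h
      rw [bAdvance, if_neg hc, List.dropWhile_cons_of_neg h, List.takeWhile_cons_of_neg h]
      simp

lemma eligPred_mono (strict : Bool) (qs qs' : Int) (p : Int × Int)
    (h : eligPred strict qs p = true) (hle : qs ≤ qs') : eligPred strict qs' p = true := by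
  cases strict <;> simp [eligPred] at h ⊢ <;> omega

lemma filter_eq_takeWhile (strict : Bool) (qs : Int) :
    ∀ (R : List (Int × Int)), R.Pairwise (fun p q => p.1 ≤ q.1) →
      R.filter (eligPred strict qs) = R.takeWhile (eligPred strict qs) := by
  intro R
  induction R with
  | nil => intro _; rfl
  | cons x t ih =>
    intro hpw
    rw [List.pairwise_cons] at hpw
    by_cases h : eligPred strict qs x = true
    · rw [List.filter_cons_of_pos h, List.takeWhile_cons_of_pos h, ih hpw.2]
    · rw [List.filter_cons_of_neg h, List.takeWhile_cons_of_neg h]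
      rw [List.filter_eq_nil_iff]
      intro y hy
      have hxy := hpw.1 y hy
      intro hyp
      exact h (by cases strict <;> simp [eligPred] at hyp ⊢ <;> omega)

lemma minSnd_append (C T : List (Int × Int)) :
    (T.map Prod.snd).foldl aMin (minSnd C) = minSnd (C ++ T) := by
  simp [minSnd, List.foldl_append, List.foldl_map]

lemma sweep_spec (strict : Bool) :
    ∀ (second C R : List (Int × Int)) (best : Option Int),
      (C ++ R).Pairwise (fun p q => p.1 ≤ q.1) →
      second.Pairwise (fun p q => p.1 ≤ q.1) →
      (∀ q ∈ second, ∀ p ∈ C, eligPred strict q.1 p = true) →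
      bSweep strict R second (minSnd C) best
        = (candList strict (C ++ R) second).foldl aMin best := by
  intro second
  induction second with
  | nil => intro C R best _ _ _; rfl
  | cons q qrest ih =>
    intro C R best hCR hsec hC
    obtain ⟨qs, qe⟩ := q
    rw [List.pairwise_cons] at hsec
    have hR : R.Pairwise (fun p q => p.1 ≤ q.1) := (List.pairwise_append.mp hCR).2.1
    have hsplit : R = R.takeWhile (eligPred strict qs) ++ R.dropWhile (eligPred strict qs) :=
      (List.takeWhile_append_dropWhile).symm
    have helig : (C ++ R).filter (eligPred strict qs) = C ++ R.takeWhile (eligPred strict qs) := by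
      rw [List.filter_append]
      congr 1
      · exact List.filter_eq_self.mpr (fun p hp => hC (qs, qe) List.mem_cons_self p hp)
      · rw [filter_eq_takeWhile strict qs R hR]
    have hT : ∀ p ∈ R.takeWhile (eligPred strict qs), eligPred strict qs p = true :=
      fun p hp => List.mem_takeWhile_imp hp
    rw [bSweep]
    rw [advance_spec]
    rw [minSnd_append]
    rw [ih (C ++ R.takeWhile (eligPred strict qs)) (R.dropWhile (eligPred strict qs)) _
        (by rw [List.append_assoc, ← hsplit]; exact hCR)
        hsec.2
        (by
          intro q' hq' p hp
          rcases List.mem_append.mp hp with h | h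
          · exact hC q' (List.mem_cons_of_mem _ hq') p h
          · exact eligPred_mono strict qs q'.1 p (hT p h) (hsec.1 q' hq'))]
    rw [List.append_assoc, ← hsplit]
    conv_rhs => rw [show candList strict (C ++ R) ((qs, qe) :: qrest)
        = ((minSnd ((C ++ R).filter (eligPred strict qs))).map
              (fun me => max me qs + (qe - qs))).toList ++ candList strict (C ++ R) qrest
          from by
            simp only [candList, List.filterMap_cons]
            cases (minSnd ((C ++ R).filter (eligPred strict qs))) <;> simp]
    rw [helig]
    cases hm : minSnd (C ++ R.takeWhile (eligPred strict qs)) with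
    | none => simp
    | some me => simp [bUpd_eq_aMin]

lemma B_reduces (astart aduration bstart bduration : List Int) :
    earliestFinishTime_alt astart aduration bstart bduration
      = ((candList false (PySem.List.sorted (toRides astart aduration) (fun p => p.1) false)
            (PySem.List.sorted (toRides bstart bduration) (fun p => p.1) false)
          ++ candList true (PySem.List.sorted (toRides bstart bduration) (fun p => p.1) false)
            (PySem.List.sorted (toRides astart aduration) (fun p => p.1) false)).foldl aMin none).getD 0 := by
  have hra := PySem.List.sorted_pairwise (xs := toRides astart aduration) (key := fun p : Int × Int => p.1)
  have hrb := PySem.List.sorted_pairwise (xs := toRides bstart bduration) (key := fun p : Int × Int => p.1)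
  show (bSweep true (PySem.List.sorted (toRides bstart bduration) (fun p => p.1) false)
      (PySem.List.sorted (toRides astart aduration) (fun p => p.1) false) none
      (bSweep false (PySem.List.sorted (toRides astart aduration) (fun p => p.1) false)
        (PySem.List.sorted (toRides bstart bduration) (fun p => p.1) false) none none)).getD 0 = _
  have s1 : bSweep false (PySem.List.sorted (toRides astart aduration) (fun p => p.1) false)
      (PySem.List.sorted (toRides bstart bduration) (fun p => p.1) false) none none
      = (candList false (PySem.List.sorted (toRides astart aduration) (fun p => p.1) false)
          (PySem.List.sorted (toRides bstart bduration) (fun p => p.1) false)).foldl aMin none := by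
    simpa [minSnd] using sweep_spec false
      (PySem.List.sorted (toRides bstart bduration) (fun p => p.1) false) []
      (PySem.List.sorted (toRides astart aduration) (fun p => p.1) false) none
      (by simpa using hra) hrb (by simp)
  rw [s1]
  have s2 := sweep_spec true
      (PySem.List.sorted (toRides astart aduration) (fun p => p.1) false) []
      (PySem.List.sorted (toRides bstart bduration) (fun p => p.1) false)
      ((candList false (PySem.List.sorted (toRides astart aduration) (fun p => p.1) false)
          (PySem.List.sorted (toRides bstart bduration) (fun p => p.1) false)).foldl aMin none)
      (by simpa using hrb) hra (by simp)
  simp only [minSnd, List.foldl_nil, List.nil_append] at s2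
  rw [s2, List.foldl_append]

-- ---- the two candidate/value domination lemmas ----

lemma minSnd_spec (l : List (Int × Int)) (m : Int) (h : minSnd l = some m) :
    (∃ p ∈ l, p.2 = m) ∧ ∀ p ∈ l, m ≤ p.2 := by
  have h' : (l.map Prod.snd).foldl aMin none = some m := by
    rw [List.foldl_map]; exact h
  obtain ⟨hmem, hall⟩ := minFold_spec _ _ h'
  obtain ⟨p, hp, hpm⟩ := List.mem_map.mp hmem
  exact ⟨⟨p, hp, hpm⟩, fun p hp => hall p.2 (List.mem_map.mpr ⟨p, hp, rfl⟩)⟩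

lemma minSnd_isSome (l : List (Int × Int)) (p : Int × Int) (hp : p ∈ l) :
    ∃ m, minSnd l = some m := by
  have : p.2 ∈ l.map Prod.snd := List.mem_map.mpr ⟨p, hp, rfl⟩
  obtain ⟨m, hm⟩ := minFold_isSome _ _ this
  rw [List.foldl_map] at hm
  exact ⟨m, hm⟩

lemma mem_candList (strict : Bool) (P second : List (Int × Int)) (c : Int) :
    c ∈ candList strict P second
      ↔ ∃ q ∈ second, ∃ me, minSnd (P.filter (eligPred strict q.1)) = some me
          ∧ c = max me q.1 + (q.2 - q.1) := by
  simp only [candList, List.mem_filterMap, Option.map_eq_some_iff]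
  constructor
  · rintro ⟨q, hq, me, hme, rfl⟩
    exact ⟨q, hq, me, hme, rfl⟩
  · rintro ⟨q, hq, me, hme, rfl⟩
    exact ⟨q, hq, me, hme, rfl⟩

theorem earliestFinishTime_spec : Claim_equal_earliestFinishTime := by
  intro astart aduration bstart bduration _ hpre
  obtain ⟨-, -, h1, h2⟩ := hpre
  unfold Spec_earliestFinishTime
  rw [A_reduces astart aduration bstart bduration h1 h2, B_reduces]
  set pa := toRides astart aduration with hpa
  set pb := toRides bstart bduration with hpb
  set ra := PySem.List.sorted pa (fun p : Int × Int => p.1) false with hra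
  set rb := PySem.List.sorted pb (fun p : Int × Int => p.1) false with hrb
  have hmemA : ∀ p : Int × Int, p ∈ ra ↔ p ∈ pa := fun p => PySem.List.mem_sorted _ _ _ _
  have hmemB : ∀ q : Int × Int, q ∈ rb ↔ q ∈ pb := fun q => PySem.List.mem_sorted _ _ _ _
  congr 1
  apply minFold_eq
  · -- every pair value is dominated by a candidate
    intro v hv
    obtain ⟨p, hp, hv'⟩ := List.mem_flatMap.mp hv
    obtain ⟨q, hq, rfl⟩ := List.mem_map.mp hv'
    by_cases h : p.1 ≤ q.1
    · have hpf : p ∈ ra.filter (eligPred false q.1) :=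
        List.mem_filter.mpr ⟨(hmemA p).mpr hp, by simpa [eligPred] using h⟩
      obtain ⟨me, hme⟩ := minSnd_isSome _ p hpf
      obtain ⟨-, hall⟩ := minSnd_spec _ _ hme
      refine ⟨max me q.1 + (q.2 - q.1), List.mem_append.mpr (Or.inl ?_), ?_⟩
      · exact (mem_candList _ _ _ _).mpr ⟨q, (hmemB q).mpr hq, me, hme, rfl⟩
      · have := hall p hpf
        rw [vPair, if_pos h]
        omega
    · have h' : q.1 < p.1 := by omega
      have hqf : q ∈ rb.filter (eligPred true p.1) :=
        List.mem_filter.mpr ⟨(hmemB q).mpr hq, by simpa [eligPred] using h'⟩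
      obtain ⟨me, hme⟩ := minSnd_isSome _ q hqf
      obtain ⟨-, hall⟩ := minSnd_spec _ _ hme
      refine ⟨max me p.1 + (p.2 - p.1), List.mem_append.mpr (Or.inr ?_), ?_⟩
      · exact (mem_candList _ _ _ _).mpr ⟨p, (hmemA p).mpr hp, me, hme, rfl⟩
      · have := hall q hqf
        rw [vPair, if_neg h]
        omega
  · -- every candidate is (equal to, hence dominated by) some pair value
    intro c hc
    rcases List.mem_append.mp hc with hc | hc
    · obtain ⟨q, hq, me, hme, rfl⟩ := (mem_candList _ _ _ _).mp hc
      obtain ⟨⟨p, hpf, hpm⟩, -⟩ := minSnd_spec _ _ hme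
      obtain ⟨hpra, hple⟩ := List.mem_filter.mp hpf
      have hple' : p.1 ≤ q.1 := by simpa [eligPred] using hple
      refine ⟨vPair p q, List.mem_flatMap.mpr ⟨p, (hmemA p).mp hpra,
        List.mem_map.mpr ⟨q, (hmemB q).mp hq, rfl⟩⟩, ?_⟩
      rw [vPair, if_pos hple', hpm]
    · obtain ⟨q, hq, me, hme, rfl⟩ := (mem_candList _ _ _ _).mp hc
      obtain ⟨⟨p, hpf, hpm⟩, -⟩ := minSnd_spec _ _ hme
      obtain ⟨hprb, hplt⟩ := List.mem_filter.mp hpf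
      have hplt' : p.1 < q.1 := by simpa [eligPred] using hplt
      refine ⟨vPair q p, List.mem_flatMap.mpr ⟨q, (hmemA q).mp hq,
        List.mem_map.mpr ⟨p, (hmemB p).mp hprb, rfl⟩⟩, ?_⟩
      rw [vPair, if_neg (by omega), hpm]
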